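-- pv_equiv track=rewrite | github.com/VedanshSaha/UCexplore-rsi-india | uc exploration/nauty_integration.py | family_to_dreadnaut
-- ===== SOURCE A (Python) =====
-- def family_to_dreadnaut(family_masks, n):
--     sets = list(sorted(family_masks))
--     m = len(sets)
--     total = m + n
--
--     adj = [[] for _ in range(total)]
--     for i, S in enumerate(sets):
--         for e in range(n):
--             if (S >> e) & 1:
--                 adj[i].append(m + e)
--                 adj[m + e].append(i)
--
--     edges = []
--     for u in range(total):
--         for v in adj[u]:
--             if u < v:
--                 edges.append((u, v))
--
--     lines = []
--     lines.append(f"n={total}")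
--     lines.append("g " + " ".join(f"{u} {v}" for u, v in edges) + " .")
--
--     sets_list = " ".join(str(i) for i in range(m))
--     elements_list = " ".join(str(i) for i in range(m, m + n))
--
--     lines.append(f"c {sets_list} ;")
--     lines.append(f"c {elements_list} ;")
--     lines.append("x")
--     lines.append("Q")
--     lines.append(".")
--
--     return "\n".join(lines)
-- ===== SOURCE B (Python) =====
-- def family_to_dreadnaut(family_masks, n):
--     # Simpler: build the edge strings in one direct pass over the sorted masks
--     # (a set-vertex i always precedes its element-vertex m+e, so no two-sided
--     # adjacency list or u < v scan is needed).
--     sets = sorted(family_masks)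
--     m = len(sets)
--     edge_strs = []
--     for i, S in enumerate(sets):
--         for e in range(n):
--             if (S >> e) & 1:
--                 edge_strs.append(f"{i} {m + e}")
--     return "\n".join([
--         f"n={m + n}",
--         "g " + " ".join(edge_strs) + " .",
--         "c " + " ".join(str(i) for i in range(m)) + " ;",
--         "c " + " ".join(str(i) for i in range(m, m + n)) + " ;",
--         "x",
--         "Q",
--         ".",
--     ])
-- ===== Notes on version B (the rewrite author's own statement) =====
-- stated objective: simpler
-- what changed: B drops A's two-sided adjacency-list construction and the subsequent u<v edge-extraction scan, emitting each edge string directly in a single pass over the sorted masks (a set vertex index is always below its element vertex index).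
import Mathlib
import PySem

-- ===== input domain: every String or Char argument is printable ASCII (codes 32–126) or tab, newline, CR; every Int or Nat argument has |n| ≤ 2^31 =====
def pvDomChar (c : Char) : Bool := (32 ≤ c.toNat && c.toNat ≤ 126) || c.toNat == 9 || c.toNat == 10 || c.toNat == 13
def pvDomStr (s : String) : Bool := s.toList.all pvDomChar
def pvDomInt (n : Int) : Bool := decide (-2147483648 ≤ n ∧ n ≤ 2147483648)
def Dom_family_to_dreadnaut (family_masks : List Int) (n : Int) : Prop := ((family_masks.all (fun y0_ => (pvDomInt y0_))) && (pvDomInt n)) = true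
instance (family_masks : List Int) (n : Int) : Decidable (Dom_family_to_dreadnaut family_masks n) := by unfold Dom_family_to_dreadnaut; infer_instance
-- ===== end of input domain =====

-- B drops A's two-sided adjacency list and its u<v extraction scan, emitting each edge
-- string directly in one pass over the sorted masks (objective: simpler).

-- ===== PORT A =====
-- adj[j].append(v); j is provably nonnegative and in range at every executed call site
def pvAppendAt (adj : List (List Int)) (j : Int) (v : Int) : List (List Int) :=
  PySem.List.pySetD adj j (PySem.List.pyGetD adj j [] ++ [v])

def family_to_dreadnaut (family_masks : List Int) (n : Int) : String :=
  let sets := PySem.List.sorted family_masks (fun x => x) false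
  let m : Int := PySem.List.len sets
  let total : Int := m + n
  let adj0 : List (List Int) := (PySem.List.pyRange 0 total 1).map (fun _ => ([] : List Int))
  let adj : List (List Int) := (PySem.List.enumerate sets 0).foldl (fun adj p =>
      (PySem.List.pyRange 0 n 1).foldl (fun adj e =>
        if PySem.Int.band (p.2 >>> (e.toNat : Int)) 1 == 1 then
          pvAppendAt (pvAppendAt adj p.1 (m + e)) (m + e) p.1
        else adj) adj) adj0
  -- 'for u in range(total): for v in adj[u]': len(adj) = len(range(total)), so iterating adj with its index is exact
  let edges : List (Int × Int) := (PySem.List.enumerate adj 0).foldl (fun es p =>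
      p.2.foldl (fun es v => if p.1 < v then es ++ [(p.1, v)] else es) es) []
  PySem.Str.join "\n"
    ["n=" ++ PySem.Int.toStr total,
     "g " ++ PySem.Str.join " " (edges.map (fun uv => PySem.Int.toStr uv.1 ++ " " ++ PySem.Int.toStr uv.2)) ++ " .",
     "c " ++ PySem.Str.join " " ((PySem.List.pyRange 0 m 1).map (fun i => PySem.Int.toStr i)) ++ " ;",
     "c " ++ PySem.Str.join " " ((PySem.List.pyRange m (m + n) 1).map (fun i => PySem.Int.toStr i)) ++ " ;",
     "x", "Q", "."]

-- ===== PORT B =====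
def family_to_dreadnaut_alt (family_masks : List Int) (n : Int) : String :=
  let sets := PySem.List.sorted family_masks (fun x => x) false
  let m : Int := PySem.List.len sets
  let edge_strs : List String := (PySem.List.enumerate sets 0).foldl (fun acc p =>
      (PySem.List.pyRange 0 n 1).foldl (fun acc e =>
        if PySem.Int.band (p.2 >>> (e.toNat : Int)) 1 == 1 then
          acc ++ [PySem.Int.toStr p.1 ++ " " ++ PySem.Int.toStr (m + e)]
        else acc) acc) []
  PySem.Str.join "\n"
    ["n=" ++ PySem.Int.toStr (m + n),
     "g " ++ PySem.Str.join " " edge_strs ++ " .",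
     "c " ++ PySem.Str.join " " ((PySem.List.pyRange 0 m 1).map (fun i => PySem.Int.toStr i)) ++ " ;",
     "c " ++ PySem.Str.join " " ((PySem.List.pyRange m (m + n) 1).map (fun i => PySem.Int.toStr i)) ++ " ;",
     "x", "Q", "."]

-- ===== PRECONDITION & SPEC =====
def Spec_family_to_dreadnaut (family_masks : List Int) (n : Int) (out : String) : Prop := out = family_to_dreadnaut_alt family_masks n
instance (family_masks : List Int) (n : Int) (out : String) : Decidable (Spec_family_to_dreadnaut family_masks n out) := by unfold Spec_family_to_dreadnaut; infer_instance

-- ===== CLAIM (what is proved, stated in full; the proofs are below) =====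
def Claim_equal_family_to_dreadnaut : Prop := ∀ (family_masks : List Int) (n : Int), Dom_family_to_dreadnaut family_masks n → Spec_family_to_dreadnaut family_masks n (family_to_dreadnaut family_masks n)

-- ===== LEMMAS AND PROOFS =====

theorem length_pvAppendAt (adj : List (List Int)) (i v : Int) :
    (pvAppendAt adj i v).length = adj.length := by
  simp [pvAppendAt, PySem.List.length_pySetD]

theorem pvAppendAt_getD (adj : List (List Int)) (i v : Int) (hi0 : 0 ≤ i)
    (hi : i < (adj.length : Int)) (j : Nat) :
    (pvAppendAt adj i v).getD j [] =
      if (j : Int) = i then adj.getD j [] ++ [v] else adj.getD j [] := by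
  unfold pvAppendAt
  rw [PySem.List.pySetD_of_nonneg _ _ hi0,
      PySem.List.pyGetD_eq_getElem _ _ hi0 (by simpa using hi)]
  have hit : i.toNat < adj.length := by omega
  rw [List.getD_eq_getElem?_getD, List.getElem?_set]
  by_cases h : (j : Int) = i
  · have : i.toNat = j := by omega
    simp [this, h, this ▸ hit, List.getD_eq_getElem?_getD]
  · have : i.toNat ≠ j := by omega
    simp [this, h, List.getD_eq_getElem?_getD]

theorem pvInner_getD (m n : Int) (p : Int × Int) (es : List Int) (adj : List (List Int))
    (hlen : m + n ≤ (adj.length : Int)) (hp0 : 0 ≤ p.1) (hp : p.1 < m)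
    (hes : ∀ e ∈ es, 0 ≤ e ∧ e < n) (j : Nat) :
    (es.foldl (fun adj e => pvAppendAt (pvAppendAt adj p.1 (m + e)) (m + e) p.1) adj).getD j [] =
      adj.getD j [] ++
        (if (j : Int) = p.1 then es.map (fun e => m + e)
         else (es.filter (fun e => m + e == (j : Int))).map (fun _ => p.1)) := by
  induction es generalizing adj with
  | nil => simp
  | cons e es ih =>
    have he := hes e (by simp)
    have hme0 : (0:Int) ≤ m + e := by omega
    have hme : m + e < (adj.length : Int) := by omega
    have hp1 : p.1 < (adj.length : Int) := by omega
    rw [List.foldl_cons,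
        ih _ (by rw [length_pvAppendAt, length_pvAppendAt]; exact hlen)
          (fun x hx => hes x (by simp [hx]))]
    rw [pvAppendAt_getD _ _ _ hme0 (by rw [length_pvAppendAt]; exact_mod_cast hme),
        pvAppendAt_getD _ _ _ hp0 (by exact_mod_cast hp1)]
    have hpne : p.1 ≠ m + e := by omega
    have hpne' : m + e ≠ p.1 := by omega
    by_cases hj : (j : Int) = p.1
    · have hje : (j : Int) ≠ m + e := by omega
      simp [hj, hpne]
    · by_cases hj2 : (j : Int) = m + e
      · simp [hj2, hpne']
      · have hne : ¬ (m + e == (j : Int)) := by simp; omega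
        simp [hj, hj2, hne]

def pvEs (n S : Int) : List Int :=
  (PySem.List.pyRange 0 n 1).filter (fun e => PySem.Int.band (S >>> (e.toNat : Int)) 1 == 1)

def pvStep (m n : Int) (adj : List (List Int)) (p : Int × Int) : List (List Int) :=
  (PySem.List.pyRange 0 n 1).foldl (fun adj e =>
    if PySem.Int.band (p.2 >>> (e.toNat : Int)) 1 == 1 then
      pvAppendAt (pvAppendAt adj p.1 (m + e)) (m + e) p.1
    else adj) adj

def pvCont (m n : Int) (p : Int × Int) (j : Nat) : List Int :=
  if (j : Int) = p.1 then (pvEs n p.2).map (fun e => m + e)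
  else ((pvEs n p.2).filter (fun e => m + e == (j : Int))).map (fun _ => p.1)

theorem pvStep_eq (m n : Int) (adj : List (List Int)) (p : Int × Int) :
    pvStep m n adj p =
      (pvEs n p.2).foldl (fun adj e => pvAppendAt (pvAppendAt adj p.1 (m + e)) (m + e) p.1) adj := by
  rw [pvStep, pvEs, PySem.List.foldl_if_eq_foldl_filter]

theorem pvStep_getD (m n : Int) (p : Int × Int) (adj : List (List Int))
    (hlen : m + n ≤ (adj.length : Int)) (hp0 : 0 ≤ p.1) (hp : p.1 < m) (j : Nat) :
    (pvStep m n adj p).getD j [] = adj.getD j [] ++ pvCont m n p j := by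
  rw [pvStep_eq, pvCont,
      pvInner_getD m n p _ adj hlen hp0 hp
        (fun e he => by
          have h1 := List.mem_of_mem_filter he
          rw [PySem.List.mem_pyRange_one] at h1
          exact h1) j]

theorem pvStep_length (m n : Int) (p : Int × Int) (adj : List (List Int)) :
    (pvStep m n adj p).length = adj.length := by
  rw [pvStep_eq]
  induction (pvEs n p.2) generalizing adj with
  | nil => rfl
  | cons e es ih => simp [List.foldl_cons, ih, length_pvAppendAt]

theorem pvBuild_getD (m n : Int) (ps : List (Int × Int)) (adj : List (List Int))
    (hlen : m + n ≤ (adj.length : Int)) (hps : ∀ p ∈ ps, 0 ≤ p.1 ∧ p.1 < m) (j : Nat) :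
    (ps.foldl (pvStep m n) adj).getD j [] = adj.getD j [] ++ ps.flatMap (fun p => pvCont m n p j) := by
  induction ps generalizing adj with
  | nil => simp
  | cons p ps ih =>
    have hp := hps p (by simp)
    rw [List.foldl_cons, ih _ (by rw [pvStep_length]; exact hlen) (fun q hq => hps q (by simp [hq])),
        pvStep_getD m n p adj hlen hp.1 hp.2 j]
    simp [List.flatMap_cons]

theorem pvBuild_length (m n : Int) (ps : List (Int × Int)) (adj : List (List Int)) :
    (ps.foldl (pvStep m n) adj).length = adj.length := by
  induction ps generalizing adj with
  | nil => rfl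
  | cons p ps ih => rw [List.foldl_cons, ih, pvStep_length]

-- the two ports' loops, named (definitionally equal to the lets in the ports)
def pvAdj (sets : List Int) (n : Int) : List (List Int) :=
  (PySem.List.enumerate sets 0).foldl (pvStep (PySem.List.len sets) n)
    ((PySem.List.pyRange 0 (PySem.List.len sets + n) 1).map (fun _ => ([] : List Int)))

def pvEdges (sets : List Int) (n : Int) : List (Int × Int) :=
  (PySem.List.enumerate (pvAdj sets n) 0).foldl (fun es p =>
    p.2.foldl (fun es v => if p.1 < v then es ++ [(p.1, v)] else es) es) []

def pvEdgeStrs (sets : List Int) (n : Int) : List String :=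
  (PySem.List.enumerate sets 0).foldl (fun acc p =>
    (PySem.List.pyRange 0 n 1).foldl (fun acc e =>
      if PySem.Int.band (p.2 >>> (e.toNat : Int)) 1 == 1 then
        acc ++ [PySem.Int.toStr p.1 ++ " " ++ PySem.Int.toStr (PySem.List.len sets + e)]
      else acc) acc) []

theorem pvFlatMap_range_single {α : Type} (m' k : Nat) (hk : k < m') (X : Nat → List α) :
    (List.range m').flatMap (fun i => if i = k then X i else []) = X k := by
  induction m' with
  | zero => omega
  | succ m' ih =>
    rw [List.range_succ, List.flatMap_append]
    by_cases h : k < m'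
    · have : m' ≠ k := by omega
      simp [ih h, this]
    · have hk' : m' = k := by omega
      have h2 : (List.range m').flatMap (fun i => if i = k then X i else []) = [] := by
        rw [List.flatMap_eq_nil_iff]
        intro i hi
        simp at hi
        have : ¬ i = k := by omega
        simp [this]
      simp [hk']
      exact fun x h3 h4 => absurd (h4 ▸ h3) (lt_irrefl k)

-- row of the finished adjacency list
theorem pvRow (sets : List Int) (n : Int) (j : Nat) :
    (pvAdj sets n).getD j [] =
      (PySem.List.enumerate sets 0).flatMap (fun p => pvCont (PySem.List.len sets) n p j) := by
  have hps : ∀ p ∈ PySem.List.enumerate sets 0, 0 ≤ p.1 ∧ p.1 < PySem.List.len sets := by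
    intro p hp
    rw [PySem.List.mem_enumerate_iff] at hp
    obtain ⟨k, hk, rfl⟩ := hp
    simp [PySem.List.len_eq]; omega
  have hlen : PySem.List.len sets + n ≤
      ((((PySem.List.pyRange 0 (PySem.List.len sets + n) 1).map
        (fun _ => ([] : List Int))).length : Int)) := by
    simp [PySem.List.length_pyRange_one]
  rw [pvAdj, pvBuild_getD _ _ _ _ hlen hps]
  have h0 : (((PySem.List.pyRange 0 (PySem.List.len sets + n) 1).map
      (fun _ => ([] : List Int))).getD j []) = [] := by
    rw [List.getD_eq_getElem?_getD, List.getElem?_map]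
    cases h : (PySem.List.pyRange 0 (PySem.List.len sets + n) 1)[j]? <;> simp
  rw [h0, List.nil_append]

theorem pvEs_mem (n S e : Int) (he : e ∈ pvEs n S) : 0 ≤ e ∧ e < n := by
  have h1 := List.mem_of_mem_filter he
  rwa [PySem.List.mem_pyRange_one] at h1

theorem pvAdj_length (sets : List Int) (n : Int) :
    (pvAdj sets n).length = (PySem.List.len sets + n).toNat := by
  rw [pvAdj, pvBuild_length, List.length_map, PySem.List.length_pyRange_one]
  simp

theorem pvEdges_eq_flatMap (sets : List Int) (n : Int) :
    pvEdges sets n = (List.range ((PySem.List.len sets + n).toNat)).flatMap (fun k =>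
      (((pvAdj sets n).getD k []).filter (fun v => decide ((k : Int) < v))).map
        (fun v => ((k : Int), v))) := by
  rw [pvEdges]
  simp only [PySem.List.foldl_append_ite (p := fun v => _ < v)]
  simp only [PySem.List.foldl_append_eq_flatMap, List.nil_append]
  rw [PySem.List.enumerate_eq_map_pyRange _ ([] : List Int), List.flatMap_map,
      PySem.List.pyRange_one, List.flatMap_map]
  simp only [PySem.List.len_eq, pvAdj_length]
  simp [PySem.List.pyGetD_natCast]
  have hmax : (max ((sets.length : Int) + n) 0).toNat = ((sets.length : Int) + n).toNat := by omega
  rw [hmax]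

theorem pvRowSet (sets : List Int) (n : Int) (k : Nat) (hk : k < sets.length) :
    ((pvAdj sets n).getD k []).filter (fun v => decide ((k : Int) < v)) =
      (pvEs n (sets.getD k 0)).map (fun e => PySem.List.len sets + e) := by
  rw [pvRow, PySem.List.enumerate_eq_map_pyRange _ (0 : Int), List.flatMap_map,
      PySem.List.pyRange_one, List.flatMap_map]
  have hcong : ∀ i ∈ List.range (PySem.List.len sets - 0).toNat,
      pvCont (PySem.List.len sets) n ((0 : Int) + (i : Int),
        PySem.List.pyGetD sets ((0 : Int) + (i : Int)) 0) k =
      (if i = k then (pvEs n (sets.getD i 0)).map (fun e => PySem.List.len sets + e) else []) := by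
    intro i hi
    simp only [zero_add, PySem.List.pyGetD_natCast]
    rw [pvCont]
    by_cases h : i = k
    · simp [h]
    · have h1 : ¬ ((k : Int) = (i : Int)) := by omega
      simp [h1, h, List.filter_eq_nil_iff]
      intro a ha
      have := pvEs_mem n _ a ha
      omega
  rw [List.flatMap_congr hcong]
  have hk' : k < (PySem.List.len sets - 0).toNat := by simp [PySem.List.len_eq]; omega
  rw [pvFlatMap_range_single _ k hk']
  rw [List.filter_eq_self.mpr]
  intro v hv
  obtain ⟨e, he, rfl⟩ := List.mem_map.mp hv
  have := pvEs_mem n _ e he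
  simp [PySem.List.len_eq]
  omega

theorem pvRowElem (sets : List Int) (n : Int) (k : Nat) (hk : sets.length ≤ k) :
    ((pvAdj sets n).getD k []).filter (fun v => decide ((k : Int) < v)) = [] := by
  rw [pvRow, List.filter_eq_nil_iff]
  intro v hv
  obtain ⟨p, hp, hv2⟩ := List.mem_flatMap.mp hv
  rw [PySem.List.mem_enumerate_iff] at hp
  obtain ⟨i, hi, rfl⟩ := hp
  rw [pvCont] at hv2
  have h1 : ¬ ((k : Int) = ((0 : Int) + (i : Int))) := by omega
  simp only [h1, if_false] at hv2
  obtain ⟨e, he, rfl⟩ := List.mem_map.mp hv2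
  simp
  omega

theorem pvKey (sets : List Int) (n : Int) :
    (pvEdges sets n).map (fun uv => PySem.Int.toStr uv.1 ++ " " ++ PySem.Int.toStr uv.2) =
      pvEdgeStrs sets n := by
  have hB : pvEdgeStrs sets n = (List.range sets.length).flatMap (fun i =>
      (pvEs n (sets.getD i 0)).map (fun e =>
        PySem.Int.toStr (i : Int) ++ " " ++ PySem.Int.toStr ((sets.length : Int) + e))) := by
    rw [pvEdgeStrs]
    simp only [PySem.List.foldl_append_if]
    simp only [PySem.List.foldl_append_eq_flatMap, List.nil_append]
    rw [PySem.List.enumerate_eq_map_pyRange _ (0 : Int), List.flatMap_map,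
        PySem.List.pyRange_one 0 (PySem.List.len sets), List.flatMap_map]
    simp [pvEs, PySem.List.len_eq, PySem.List.pyGetD_natCast, PySem.List.pyRange_one]
  have hA : (pvEdges sets n).map (fun uv => PySem.Int.toStr uv.1 ++ " " ++ PySem.Int.toStr uv.2) =
      (List.range (((sets.length : Int) + n).toNat)).flatMap (fun k =>
        if k < sets.length then (pvEs n (sets.getD k 0)).map (fun e =>
          PySem.Int.toStr (k : Int) ++ " " ++ PySem.Int.toStr ((sets.length : Int) + e)) else []) := by
    rw [pvEdges_eq_flatMap, List.map_flatMap]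
    simp only [PySem.List.len_eq]
    apply List.flatMap_congr
    intro k hk
    by_cases h : k < sets.length
    · have hrs := pvRowSet sets n k h
      simp only [PySem.List.len_eq] at hrs
      rw [hrs]
      simp [h, List.map_map, Function.comp]
    · have hre := pvRowElem sets n k (by omega)
      rw [hre]
      simp [h]
  rw [hA, hB]
  by_cases hn : 0 ≤ n
  · have hL : (((sets.length : Int) + n).toNat) = sets.length + n.toNat := by omega
    rw [hL, List.range_add, List.flatMap_append]
    have h2 : ((List.range n.toNat).map (fun x => sets.length + x)).flatMap (fun k =>
        if k < sets.length then (pvEs n (sets.getD k 0)).map (fun e =>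
          PySem.Int.toStr (k : Int) ++ " " ++ PySem.Int.toStr ((sets.length : Int) + e)) else []) = [] := by
      rw [List.flatMap_eq_nil_iff]
      intro k hk
      obtain ⟨x, hx, rfl⟩ := List.mem_map.mp hk
      simp
    rw [h2, List.append_nil]
    apply List.flatMap_congr
    intro k hk
    simp at hk
    simp [hk]
  · have hes : ∀ S, pvEs n S = [] := fun S => by
      simp [pvEs, PySem.List.pyRange_one_eq_nil (by omega : n ≤ 0)]
    simp only [hes, List.map_nil]
    rw [List.flatMap_eq_nil_iff.mpr (fun k _ => by simp),
        List.flatMap_eq_nil_iff.mpr (fun k _ => by simp)]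

-- the two ports' inner computations, named (definitionally the lets of the ports)
theorem pvPorts_eq (family_masks : List Int) (n : Int) :
    family_to_dreadnaut family_masks n = family_to_dreadnaut_alt family_masks n := by
  show PySem.Str.join "\n"
      ["n=" ++ PySem.Int.toStr (PySem.List.len (PySem.List.sorted family_masks (fun x => x) false) + n),
       "g " ++ PySem.Str.join " "
         ((pvEdges (PySem.List.sorted family_masks (fun x => x) false) n).map
           (fun uv => PySem.Int.toStr uv.1 ++ " " ++ PySem.Int.toStr uv.2)) ++ " .",
       "c " ++ PySem.Str.join " " ((PySem.List.pyRange 0 (PySem.List.len (PySem.List.sorted family_masks (fun x => x) false)) 1).map (fun i => PySem.Int.toStr i)) ++ " ;",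
       "c " ++ PySem.Str.join " " ((PySem.List.pyRange (PySem.List.len (PySem.List.sorted family_masks (fun x => x) false)) (PySem.List.len (PySem.List.sorted family_masks (fun x => x) false) + n) 1).map (fun i => PySem.Int.toStr i)) ++ " ;",
       "x", "Q", "."]
    = PySem.Str.join "\n"
      ["n=" ++ PySem.Int.toStr (PySem.List.len (PySem.List.sorted family_masks (fun x => x) false) + n),
       "g " ++ PySem.Str.join " " (pvEdgeStrs (PySem.List.sorted family_masks (fun x => x) false) n) ++ " .",
       "c " ++ PySem.Str.join " " ((PySem.List.pyRange 0 (PySem.List.len (PySem.List.sorted family_masks (fun x => x) false)) 1).map (fun i => PySem.Int.toStr i)) ++ " ;",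
       "c " ++ PySem.Str.join " " ((PySem.List.pyRange (PySem.List.len (PySem.List.sorted family_masks (fun x => x) false)) (PySem.List.len (PySem.List.sorted family_masks (fun x => x) false) + n) 1).map (fun i => PySem.Int.toStr i)) ++ " ;",
       "x", "Q", "."]
  rw [pvKey]

-- ===== VERDICT (by name: the statement is the Claim_ definition above) =====
theorem family_to_dreadnaut_spec : Claim_equal_family_to_dreadnaut := by
  intro family_masks n _
  unfold Spec_family_to_dreadnaut
  exact pvPorts_eq family_masks n
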